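-- pv_equiv track=rewrite | github.com/ranasalalali/spacy_mi | spacy_mi_dictionary_attack_results_visualizer.py | word_shape
-- ===== SOURCE A (Python) =====
-- def word_shape(text=None):
--     if len(text) >= 100:
--         return "LONG"
--     shape = []
--     last = ""
--     shape_char = ""
--     seq = 0
--     for char in text:
--         if char.isalpha():
--             if char.isupper():
--                 shape_char = "X"
--             else:
--                 shape_char = "x"
--         elif char.isdigit():
--             shape_char = "d"
--         else:
--             shape_char = char
--         if shape_char == last:
--             seq += 1
--         else:
--             seq = 0
--             last = shape_char
--         if seq < 4:
--             shape.append(shape_char)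
--     return "".join(shape)
-- ===== SOURCE B (Python) =====
-- def word_shape(text=None):
--     if len(text) >= 100:
--         return "LONG"
--     syms = ["X" if c.isupper() else "x" if c.isalpha() else "d" if c.isdigit() else c
--             for c in text]
--     return "".join(s for i, s in enumerate(syms)
--                    if syms[max(0, i - 4):i].count(s) < 4)
-- ===== Notes on version B (the rewrite author's own statement) =====
-- stated objective: alternative
-- what changed: A carries mutable last/seq run-counting state through one loop; B maps each character to its shape symbol and then keeps symbol i by a stateless window test (the symbol must not already fill the previous four-symbol slice), so the run cap falls out of a per-index filter instead of an accumulator.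
import Mathlib
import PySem

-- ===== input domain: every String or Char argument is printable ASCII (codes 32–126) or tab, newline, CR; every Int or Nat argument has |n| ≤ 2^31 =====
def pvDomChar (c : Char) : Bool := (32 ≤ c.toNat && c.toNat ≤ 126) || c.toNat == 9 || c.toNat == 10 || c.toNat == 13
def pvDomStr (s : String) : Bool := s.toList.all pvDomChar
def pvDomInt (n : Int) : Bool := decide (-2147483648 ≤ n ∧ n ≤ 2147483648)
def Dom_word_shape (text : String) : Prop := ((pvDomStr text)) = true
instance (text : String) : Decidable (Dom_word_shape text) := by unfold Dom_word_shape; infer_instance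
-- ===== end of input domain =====

-- B replaces A's stateful last/seq run-counting loop by a per-index window filter:
-- map chars to shape symbols, keep symbol i unless it already fills the previous
-- 4-symbol window (objective: alternative decomposition, same cost).


-- ===== PORT A =====
-- loop body of A: state (shape, last, seq); shape_char computed with A's nesting
def wsStepA (st : List Char × List Char × Nat) (c : Char) : List Char × List Char × Nat :=
  let shape_char : Char :=
    if PySem.Chars.isalpha c then
      (if PySem.Chars.isupper c then 'X' else 'x')
    else if PySem.Chars.isdigit c then 'd'
    else c
  let shape := st.1
  let last := st.2.1
  let seq := st.2.2
  let seq' : Nat := if [shape_char] = last then seq + 1 else 0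
  let last' : List Char := if [shape_char] = last then last else [shape_char]
  (if seq' < 4 then shape ++ [shape_char] else shape, last', seq')

def word_shape (text : String) : String :=
  if 100 ≤ PySem.Str.len text then "LONG"
  else String.ofList (text.toList.foldl wsStepA ([], [], 0)).1

-- ===== PORT B =====
-- B's symbol map (isupper checked first, as in Source B)
def wsSymB (c : Char) : Char :=
  if PySem.Chars.isupper c then 'X'
  else if PySem.Chars.isalpha c then 'x'
  else if PySem.Chars.isdigit c then 'd'
  else c

-- the generator's filter: keep syms[i] iff syms[max(0,i-4):i].count(syms[i]) < 4
def wsKeepB (syms : List Char) (p : Int × Char) : Option Char :=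
  if (PySem.List.slice syms (some (max 0 (p.1 - 4))) (some p.1)).count p.2 < 4
  then some p.2 else none

def word_shape_alt (text : String) : String :=
  if 100 ≤ PySem.Str.len text then "LONG"
  else
    let syms := text.toList.map wsSymB
    String.ofList ((PySem.List.enumerate syms 0).filterMap (wsKeepB syms))

-- ===== PRECONDITION & SPEC =====
def Spec_word_shape (text : String) (out : String) : Prop := out = word_shape_alt text
instance (text : String) (out : String) : Decidable (Spec_word_shape text out) := by unfold Spec_word_shape; infer_instance

-- ===== CLAIM (what is proved, stated in full; the proofs are below) =====
def Claim_equal_word_shape : Prop := ∀ (text : String), Dom_word_shape text → Spec_word_shape text (word_shape text)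

-- ===== LEMMAS AND PROOFS =====

-- A's nested shape_char computation equals B's symbol map (isupper implies isalpha)
lemma wsSym_eq (c : Char) :
    (if PySem.Chars.isalpha c then
      (if PySem.Chars.isupper c then 'X' else 'x')
     else if PySem.Chars.isdigit c then 'd' else c) = wsSymB c := by
  simp only [wsSymB, PySem.Chars.isalpha]
  by_cases hu : PySem.Chars.isupper c = true <;> by_cases hl : PySem.Chars.islower c = true <;>
    simp [hu, hl]

-- length of the maximal constant-a suffix of s
def trailRun (a : Char) (s : List Char) : Nat := (s.reverse.takeWhile (· == a)).length

-- A's `last` after processing symbols s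
def lastT (s : List Char) : List Char :=
  match s.getLast? with | none => [] | some c => [c]

-- A's `seq` after processing symbols s
def seqOf (s : List Char) : Nat :=
  match s.getLast? with | none => 0 | some c => trailRun c s - 1

-- B's output on a symbol list
def bOut (syms : List Char) : List Char :=
  (PySem.List.enumerate syms 0).filterMap (wsKeepB syms)

lemma trailRun_concat_self (a : Char) (s : List Char) :
    trailRun a (s ++ [a]) = trailRun a s + 1 := by
  simp [trailRun]

lemma trailRun_concat_ne (a b : Char) (s : List Char) (h : b ≠ a) :
    trailRun a (s ++ [b]) = 0 := by
  simp [trailRun, h]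

-- A's seq update equals the trailing run of the new symbol in the old symbols
lemma seq_update (a : Char) (s : List Char) :
    (if [a] = lastT s then seqOf s + 1 else 0) = trailRun a s := by
  rcases List.eq_nil_or_concat' s with rfl | ⟨t, b, rfl⟩
  · simp [lastT, trailRun]
  · by_cases hab : a = b
    · subst hab
      simp [lastT, seqOf, List.getLast?_concat, trailRun_concat_self]
    · have h1 : ¬ ([a] = lastT (t ++ [b])) := by
        simp [lastT, hab]
      rw [if_neg h1, trailRun_concat_ne a b t (fun h => hab h.symm)]

-- counting in a take-k prefix reaches k exactly when the constant prefix does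
lemma count_take_eq_iff (a : Char) (t : List Char) (k : Nat) :
    (t.take k).count a = k ↔ k ≤ (t.takeWhile (· == a)).length := by
  induction t generalizing k with
  | nil => cases k <;> simp
  | cons x xs ih =>
    cases k with
    | zero => simp
    | succ k =>
      by_cases hx : x = a
      · subst hx
        simp [List.take_succ_cons, ih]
      · have hc : (x :: xs.take k).count a = (xs.take k).count a := by
          simp [hx]
        constructor
        · intro h
          rw [List.take_succ_cons, hc] at h
          exfalso
          have hle := List.count_le_length (l := xs.take k) (a := a)
          have := List.length_take_le k xs
          omega
        · intro h
          simp [hx] at h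

-- B's window over the prefix of a longer list, at an index inside the prefix
lemma window_prefix (s tl : List Char) (k : Nat) (hk : k ≤ s.length) :
    PySem.List.slice (s ++ tl) (some (max 0 ((k : Int) - 4))) (some (k : Int))
      = PySem.List.slice s (some (max 0 ((k : Int) - 4))) (some (k : Int)) := by
  have hmax : (max 0 ((k : Int) - 4)) = ((k - 4 : Nat) : Int) := by omega
  rw [hmax, PySem.List.slice_natCast, PySem.List.slice_natCast,
      List.drop_append_of_le_length (by omega),
      List.take_append_of_le_length (by simp; omega)]

-- B's window at the end of s is the last ≤4 symbols
lemma window_eq (s : List Char) :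
    PySem.List.slice s (some (max 0 ((s.length : Int) - 4))) (some (s.length : Int))
      = s.drop (s.length - 4) := by
  have hmax : (max 0 ((s.length : Int) - 4)) = ((s.length - 4 : Nat) : Int) := by omega
  rw [hmax, PySem.List.slice_natCast]
  exact List.take_of_length_le (by simp)

-- B's keep-condition for the next symbol is A's run-length cap
lemma keep_iff (a : Char) (s : List Char) :
    ((s.drop (s.length - 4)).count a < 4) ↔ trailRun a s < 4 := by
  have hrev : s.drop (s.length - 4) = (s.reverse.take 4).reverse := by
    rw [List.take_reverse]
    simp
  rw [hrev, List.count_reverse]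
  have h1 := count_take_eq_iff a s.reverse 4
  have h2 : (s.reverse.take 4).count a ≤ 4 :=
    le_trans List.count_le_length (by simp)
  unfold trailRun
  omega

-- B's output grows by one conditional entry per appended symbol
lemma bOut_concat (s : List Char) (a : Char) :
    bOut (s ++ [a]) = bOut s ++ (if trailRun a s < 4 then [a] else []) := by
  unfold bOut
  rw [PySem.List.enumerate_append, List.filterMap_append]
  congr 1
  · refine List.filterMap_congr (fun p hp => ?_)
    rcases (PySem.List.mem_enumerate_iff _ _ _).1 hp with ⟨k, hk, rfl⟩
    simp only [wsKeepB, zero_add]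
    rw [window_prefix s [a] k (le_of_lt hk)]
  · simp only [PySem.List.enumerate, zero_add, List.filterMap_cons, List.filterMap_nil]
    simp only [wsKeepB]
    rw [window_prefix s [a] s.length le_rfl, window_eq]
    by_cases h : trailRun a s < 4
    · rw [if_pos ((keep_iff a s).2 h), if_pos h]
    · rw [if_neg (fun hc => h ((keep_iff a s).1 hc)), if_neg h]

lemma lastT_concat (s : List Char) (a : Char) : lastT (s ++ [a]) = [a] := by
  simp [lastT]

lemma seqOf_concat (s : List Char) (a : Char) : seqOf (s ++ [a]) = trailRun a s := by
  simp [seqOf, trailRun_concat_self]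

-- main invariant: A's loop state after l is B's output, the last symbol, the trailing run - 1
lemma main_inv (l : List Char) :
    l.foldl wsStepA ([], [], 0) =
      (bOut (l.map wsSymB), lastT (l.map wsSymB), seqOf (l.map wsSymB)) := by
  induction l using List.reverseRecOn with
  | nil => simp [bOut, lastT, seqOf]
  | append_singleton t c ih =>
    rw [List.foldl_append, List.foldl_cons, List.foldl_nil, ih]
    simp only [List.map_append, List.map_cons, List.map_nil]
    set s := t.map wsSymB with hs
    show wsStepA (bOut s, lastT s, seqOf s) c = _
    rw [show wsStepA (bOut s, lastT s, seqOf s) c =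
        (if (if [wsSymB c] = lastT s then seqOf s + 1 else 0) < 4
           then bOut s ++ [wsSymB c] else bOut s,
         if [wsSymB c] = lastT s then lastT s else [wsSymB c],
         if [wsSymB c] = lastT s then seqOf s + 1 else 0) from by
      simp only [wsStepA, wsSym_eq]]
    rw [seq_update, bOut_concat, lastT_concat, seqOf_concat]
    refine Prod.ext ?_ (Prod.ext ?_ rfl)
    · by_cases h4 : trailRun (wsSymB c) s < 4 <;> simp [h4]
    · by_cases hl : [wsSymB c] = lastT s
      · rw [if_pos hl, ← hl]
      · rw [if_neg hl]

-- ===== VERDICT (by name: the statement is the Claim_ definition above) =====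
theorem word_shape_spec : Claim_equal_word_shape := by
  intro text _
  unfold Spec_word_shape word_shape word_shape_alt
  by_cases h : 100 ≤ PySem.Str.len text
  · rw [if_pos h, if_pos h]
  · rw [if_neg h, if_neg h, main_inv]
    rfl
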